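-- pv_equiv track=rewrite | github.com/dj-lumiere/problem-solving-boj | 백준/Ruby/26665. Iloczyny Fibonacciego/Iloczyny Fibonacciego.py | lucas_to_phinary
-- ===== SOURCE A (Python) =====
-- def lucas_to_phinary(target):
--     result = [0] * (len(target) * 2 - 1)
--     result[len(target) - 1] = target[0] * 2
--     for index in range(1, len(target)):
--         result[len(target) + index - 1] += target[index]
--         result[len(target) - index - 1] += -target[index]
--         if index % 2 == 0:
--             result[len(target) - index - 1] += target[index] * 2
--     return result
-- ===== SOURCE B (Python) =====
-- def lucas_to_phinary(target):
--     result = [target[0] * 2]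
--     for i in range(1, len(target)):
--         outer = [target[i]] if i % 2 == 0 else [-target[i]]
--         result = outer + result + [target[i]]
--     return result
-- ===== Notes on version B (the rewrite author's own statement) =====
-- stated objective: alternative
-- what changed: B replaces A's preallocated zero buffer filled by index-scatter '+=' writes with an onion-style loop that never indexes the result: it starts from the doubled first element alone and, for each later index i, wraps the accumulator between the signed element on the left and the plain element on the right, growing the palindrome-shaped output inside-out by concatenation.
import Mathlib
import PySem

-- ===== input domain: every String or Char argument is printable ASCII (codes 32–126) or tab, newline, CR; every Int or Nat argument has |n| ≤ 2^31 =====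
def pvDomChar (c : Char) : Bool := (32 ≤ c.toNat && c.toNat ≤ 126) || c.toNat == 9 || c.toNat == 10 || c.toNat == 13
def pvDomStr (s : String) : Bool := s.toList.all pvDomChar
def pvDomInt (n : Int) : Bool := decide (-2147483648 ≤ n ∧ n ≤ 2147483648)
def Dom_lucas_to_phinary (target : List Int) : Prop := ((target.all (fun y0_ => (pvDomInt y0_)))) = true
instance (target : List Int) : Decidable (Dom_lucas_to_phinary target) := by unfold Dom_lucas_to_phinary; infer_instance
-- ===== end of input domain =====

-- B grows the palindrome-shaped output inside-out like an onion, each step wrapping the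
-- accumulator between the signed element and the plain element, instead of A's
-- index-scatter writes into a preallocated zero buffer; objective: alternative (not faster).

-- ===== PORT A =====
-- loop body of A, ported step for step ('result[i] += v' = pyGetD then pySetD)
def pvStepA (target : List Int) (r : List Int) (index : Int) : List Int :=
  let n : Int := (target.length : Int)
  let r := PySem.List.pySetD r (n + index - 1)
    (PySem.List.pyGetD r (n + index - 1) 0 + PySem.List.pyGetD target index 0)
  let r := PySem.List.pySetD r (n - index - 1)
    (PySem.List.pyGetD r (n - index - 1) 0 + (-(PySem.List.pyGetD target index 0)))
  if index % 2 == 0 then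
    PySem.List.pySetD r (n - index - 1)
      (PySem.List.pyGetD r (n - index - 1) 0 + PySem.List.pyGetD target index 0 * 2)
  else r

def lucas_to_phinary (target : List Int) : List Int :=
  let n : Int := (target.length : Int)
  let result : List Int := List.replicate (n * 2 - 1).toNat 0
  let result := PySem.List.pySetD result (n - 1) (PySem.List.pyGetD target 0 0 * 2)
  (PySem.List.pyRange 1 n 1).foldl (pvStepA target) result

-- ===== PORT B =====
-- loop body of B: wrap the accumulator in the ring for index i
def pvStepB (target : List Int) (r : List Int) (i : Int) : List Int :=
  let outer := if i % 2 == 0 then [PySem.List.pyGetD target i 0]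
               else [-(PySem.List.pyGetD target i 0)]
  outer ++ r ++ [PySem.List.pyGetD target i 0]

def lucas_to_phinary_alt (target : List Int) : List Int :=
  (PySem.List.pyRange 1 (target.length : Int) 1).foldl (pvStepB target)
    [PySem.List.pyGetD target 0 0 * 2]

-- ===== PRECONDITION & SPEC =====
-- Pre_ excludes only the empty list, on which both A and B raise IndexError.
def Pre_lucas_to_phinary (target : List Int) : Prop := target ≠ []
instance (target : List Int) : Decidable (Pre_lucas_to_phinary target) := by unfold Pre_lucas_to_phinary; infer_instance
def pvWitness_lucas_to_phinary : List Int := ([1, 2, 3])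

def Spec_lucas_to_phinary (target : List Int) (out : List Int) : Prop := out = lucas_to_phinary_alt target
instance (target : List Int) (out : List Int) : Decidable (Spec_lucas_to_phinary target out) := by unfold Spec_lucas_to_phinary; infer_instance

-- ===== CLAIM =====
def Claim_equal_lucas_to_phinary : Prop := ∀ (target : List Int), Dom_lucas_to_phinary target → Pre_lucas_to_phinary target → Spec_lucas_to_phinary target (lucas_to_phinary target)

-- ===== LEMMAS AND PROOFS =====

-- the common closed form: signed reversed lower half, doubled head, tail
def pvF (t : List Int) (i : Int) : Int :=
  if i % 2 == 0 then PySem.List.pyGetD t i 0 else -(PySem.List.pyGetD t i 0)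

def pvE (t : List Int) : List Int :=
  (PySem.List.pyRange ((t.length : Int) - 1) 0 (-1)).map (pvF t)
    ++ [PySem.List.pyGetD t 0 0 * 2] ++ t.tail

lemma pv_getD_at (A B : List Int) (j : Nat) (hj : A.length = j) (b : Int) :
    (A ++ b :: B).getD j 0 = b := by
  subst hj; simp [List.getD]

lemma pv_set_at (A B : List Int) (j : Nat) (hj : A.length = j) (b v : Int) :
    (A ++ b :: B).set j v = A ++ v :: B := by
  subst hj; simp

-- one loop iteration of A, acting on the structured state
lemma pv_step_eq (t : List Int) (m k : Nat) (low mid : List Int) (c : Int)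
    (ht : t.length = m + 1) (hk : k < m) (hlow : low.length = k) (hmid : mid.length = k) :
    pvStepA t (List.replicate (m - k) 0 ++ low ++ [c] ++ mid ++ List.replicate (m - k) 0) ((k : Int) + 1)
      = List.replicate (m - (k + 1)) 0 ++ (pvF t ((k : Int) + 1) :: low) ++ [c]
          ++ (mid ++ [PySem.List.pyGetD t ((k : Int) + 1) 0]) ++ List.replicate (m - (k + 1)) 0 := by
  have h1 : (t.length : Int) + ((k : Int) + 1) - 1 = ((m + k + 1 : Nat) : Int) := by
    push_cast [ht]; ring
  have h2 : (t.length : Int) - ((k : Int) + 1) - 1 = ((m - k - 1 : Nat) : Int) := by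
    have : ((m - k - 1 : Nat) : Int) = (m : Int) - k - 1 := by omega
    rw [this]; push_cast [ht]; ring
  have e1 : List.replicate (m - k) (0 : Int) = 0 :: List.replicate (m - k - 1) 0 := by
    rw [show m - k = (m - k - 1) + 1 by omega, List.replicate_succ]; simp
  have e2 : List.replicate (m - k) (0 : Int) = List.replicate (m - k - 1) 0 ++ [0] := by
    rw [show m - k = (m - k - 1) + 1 by omega, List.replicate_succ']; simp
  have hL : List.replicate (m - k) (0:Int) ++ low ++ [c] ++ mid ++ List.replicate (m - k) 0
      = (List.replicate (m - k) 0 ++ low ++ [c] ++ mid) ++ 0 :: List.replicate (m - k - 1) 0 := by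
    rw [e1]
  have hA1 : (List.replicate (m - k) (0:Int) ++ low ++ [c] ++ mid).length = m + k + 1 := by
    simp [hlow, hmid]; omega
  have hL2 : ∀ v : Int, (List.replicate (m - k) (0:Int) ++ low ++ [c] ++ mid) ++ v :: List.replicate (m - k - 1) 0
      = List.replicate (m - k - 1) 0 ++ 0 :: (low ++ [c] ++ mid ++ v :: List.replicate (m - k - 1) 0) := by
    intro v; conv_lhs => rw [e2]
    simp
  have hP1 : (List.replicate (m - k - 1) (0:Int)).length = m - k - 1 := by simp
  have hmm : m - (k + 1) = m - k - 1 := by omega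
  have hv : (0 : Int) + -(PySem.List.pyGetD t ((k:Int) + 1) 0) + PySem.List.pyGetD t ((k:Int) + 1) 0 * 2
      = PySem.List.pyGetD t ((k:Int) + 1) 0 := by ring
  simp only [pvStepA, h1, h2, PySem.List.pySetD_natCast, PySem.List.pyGetD_natCast]
  rw [hL, pv_getD_at _ _ _ hA1, pv_set_at _ _ _ hA1, hL2,
      pv_getD_at _ _ _ hP1, pv_set_at _ _ _ hP1]
  simp only [pvF]
  split_ifs with h
  · rw [pv_getD_at _ _ _ hP1, pv_set_at _ _ _ hP1, hv]
    simp [hmm, List.append_assoc]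
  · simp [hmm, List.append_assoc]

-- loop invariant for A
lemma pv_inv (t : List Int) (m : Nat) (ht : t.length = m + 1) (k : Nat) (hk : k ≤ m) :
    (PySem.List.pyRange 1 ((k : Int) + 1) 1).foldl (pvStepA t)
        (List.replicate m 0 ++ [PySem.List.pyGetD t 0 0 * 2] ++ List.replicate m 0)
      = List.replicate (m - k) 0 ++ (PySem.List.pyRange (k : Int) 0 (-1)).map (pvF t)
          ++ [PySem.List.pyGetD t 0 0 * 2] ++ (t.drop 1).take k ++ List.replicate (m - k) 0 := by
  induction k with
  | zero =>
    simp [PySem.List.pyRange_one_eq_nil, PySem.List.pyRange_neg_one_eq_nil]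
  | succ k ih =>
    have hk' : k ≤ m := by omega
    have hkm : k < m := by omega
    have hc : ((k + 1 : Nat) : Int) + 1 = ((k : Int) + 1) + 1 := by push_cast; ring
    rw [hc, PySem.List.pyRange_one_succ_right (by omega : (1:Int) ≤ (k:Int) + 1),
        List.foldl_append, List.foldl_cons, List.foldl_nil, ih hk']
    rw [pv_step_eq t m k _ _ _ ht hkm (by simp [PySem.List.length_pyRange_neg_one])
        (by simp [List.length_take, ht]; omega)]
    have h1 : pvF t ((k : Int) + 1) :: (PySem.List.pyRange (k : Int) 0 (-1)).map (pvF t)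
        = (PySem.List.pyRange ((k + 1 : Nat) : Int) 0 (-1)).map (pvF t) := by
      rw [show ((k + 1 : Nat) : Int) = (k : Int) + 1 by push_cast; ring,
          PySem.List.pyRange_neg_one_cons (a := (k : Int) + 1) (b := 0) (by omega), List.map_cons]
      norm_num
    have h2 : (t.drop 1).take k ++ [PySem.List.pyGetD t ((k : Int) + 1) 0] = (t.drop 1).take (k + 1) := by
      have hlt : k < (t.drop 1).length := by simp [ht]; omega
      rw [List.take_add_one]
      congr 1
      rw [List.getElem?_eq_getElem hlt]
      have : PySem.List.pyGetD t ((k : Int) + 1) 0 = t.getD (k+1) 0 := by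
        rw [show ((k : Int) + 1) = ((k + 1 : Nat) : Int) by push_cast; ring, PySem.List.pyGetD_natCast]
      rw [this]
      simp [List.getD, List.getElem?_eq_getElem (by omega : k + 1 < t.length)]
    rw [h1, h2]

-- the initial buffer with the center written
lemma pv_init_eq (t : List Int) (m : Nat) (ht : t.length = m + 1) :
    PySem.List.pySetD (List.replicate (((t.length : Int) * 2 - 1)).toNat 0) ((t.length : Int) - 1)
        (PySem.List.pyGetD t 0 0 * 2)
      = List.replicate m 0 ++ [PySem.List.pyGetD t 0 0 * 2] ++ List.replicate m 0 := by
  have h1 : ((t.length : Int) * 2 - 1).toNat = m + 1 + m := by rw [ht]; push_cast; omega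
  have h2 : ((t.length : Int) - 1) = ((m : Nat) : Int) := by rw [ht]; push_cast; ring
  rw [h1, h2, PySem.List.pySetD_natCast]
  rw [show m + 1 + m = m + (m + 1) by omega, List.replicate_add, List.replicate_succ]
  rw [pv_set_at _ _ _ (by simp)]
  simp

-- A computes the closed form
lemma pv_A_eq (t : List Int) (hne : t ≠ []) : lucas_to_phinary t = pvE t := by
  obtain ⟨m, ht⟩ : ∃ m, t.length = m + 1 := by
    cases t with
    | nil => exact absurd rfl hne
    | cons x xs => exact ⟨xs.length, rfl⟩
  simp only [lucas_to_phinary, pvE]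
  rw [pv_init_eq t m ht]
  have hn : (t.length : Int) = ((m : Nat) : Int) + 1 := by rw [ht]; push_cast; ring
  rw [hn, pv_inv t m ht m le_rfl, show ((m : Int) + 1 - 1) = (m : Int) by ring]
  have htake : (t.drop 1).take m = t.tail := by
    rw [← List.drop_one]
    exact List.take_of_length_le (by simp [ht])
  rw [htake]
  simp

-- B's loop invariant: after iterations 1..k the accumulator is the k innermost rings
lemma pv_B_inv (t : List Int) (m : Nat) (ht : t.length = m + 1) (k : Nat) (hk : k ≤ m) :
    (PySem.List.pyRange 1 ((k : Int) + 1) 1).foldl (pvStepB t) [PySem.List.pyGetD t 0 0 * 2]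
      = (PySem.List.pyRange (k : Int) 0 (-1)).map (pvF t)
          ++ [PySem.List.pyGetD t 0 0 * 2] ++ (t.drop 1).take k := by
  induction k with
  | zero =>
    simp [PySem.List.pyRange_one_eq_nil, PySem.List.pyRange_neg_one_eq_nil]
  | succ k ih =>
    have hk' : k ≤ m := by omega
    have hc : ((k + 1 : Nat) : Int) + 1 = ((k : Int) + 1) + 1 := by push_cast; ring
    rw [hc, PySem.List.pyRange_one_succ_right (by omega : (1:Int) ≤ (k:Int) + 1),
        List.foldl_append, List.foldl_cons, List.foldl_nil, ih hk']
    have h1 : pvF t ((k : Int) + 1) :: (PySem.List.pyRange (k : Int) 0 (-1)).map (pvF t)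
        = (PySem.List.pyRange ((k + 1 : Nat) : Int) 0 (-1)).map (pvF t) := by
      rw [show ((k + 1 : Nat) : Int) = (k : Int) + 1 by push_cast; ring,
          PySem.List.pyRange_neg_one_cons (a := (k : Int) + 1) (b := 0) (by omega), List.map_cons]
      norm_num
    have h2 : (t.drop 1).take k ++ [PySem.List.pyGetD t ((k : Int) + 1) 0] = (t.drop 1).take (k + 1) := by
      have hlt : k < (t.drop 1).length := by simp [ht]; omega
      rw [List.take_add_one]
      congr 1
      rw [List.getElem?_eq_getElem hlt]
      have : PySem.List.pyGetD t ((k : Int) + 1) 0 = t.getD (k+1) 0 := by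
        rw [show ((k : Int) + 1) = ((k + 1 : Nat) : Int) by push_cast; ring, PySem.List.pyGetD_natCast]
      rw [this]
      simp [List.getD, List.getElem?_eq_getElem (show k + 1 < t.length by omega)]
    rw [← h1, ← h2]
    simp only [pvStepB, pvF]
    split_ifs with h
    · simp [List.append_assoc]
    · simp [List.append_assoc]

-- B computes the closed form
lemma pv_B_eq (m : Nat) : ∀ (t : List Int), t.length = m + 1 → lucas_to_phinary_alt t = pvE t := by
  intro t ht
  have hn : (t.length : Int) = ((m : Nat) : Int) + 1 := by rw [ht]; push_cast; ring
  simp only [lucas_to_phinary_alt, pvE]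
  rw [hn, pv_B_inv t m ht m le_rfl, show ((m : Int) + 1 - 1) = (m : Int) by ring]
  have htake : (t.drop 1).take m = t.tail := by
    rw [← List.drop_one]
    exact List.take_of_length_le (by simp [ht])
  rw [htake]

-- ===== VERDICT =====
theorem lucas_to_phinary_spec : Claim_equal_lucas_to_phinary := by
  intro t _ hne
  unfold Spec_lucas_to_phinary
  obtain ⟨m, ht⟩ : ∃ m, t.length = m + 1 := by
    cases t with
    | nil => exact absurd rfl hne
    | cons x xs => exact ⟨xs.length, rfl⟩
  rw [pv_A_eq t hne, pv_B_eq m t ht]
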